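-- pv_equiv track=rewrite | github.com/CrossR/rockbox_db_py | tools/canonicalize.py | _select_canonical_genre_for_entry
-- ===== SOURCE A (Python) =====
-- from collections import Counter, deque
-- from typing import Optional, List, Dict
--
-- def _select_canonical_genre_for_entry(
--     original_genre_str: Optional[str], genre_canonical_map: Dict[str, str]
-- ) -> Optional[str]:
--     """
--     Selects the most appropriate single canonical genre for an entry from its
--     original (potentially multi-valued) genre string, using a canonicalization map.
--
--     Logic:
--     1. Splits the original genre string into individual genres.
--     2. Maps each individual genre to its canonical form using genre_canonical_map.
--     3. Counts occurrences of each canonical genre.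
--     4. Chooses the most frequent canonical genre.
--     5. In case of a tie in frequency, selects the canonical genre that appeared
--        first in the original split list.
--
--     Args:
--         original_genre_str: The original genre string for the entry (e.g., "Rock; Pop").
--         genre_canonical_map: A dictionary mapping sub-genres to their canonical forms.
--
--     Returns:
--         The chosen single canonical genre string (lowercase), or None if no valid
--         genre can be determined.
--     """
--     if not original_genre_str:
--         # If original is None or empty, check if it maps to a default canonical genre.
--         # This handles tracks with no genre, or just whitespace.
--         return genre_canonical_map.get("", "") if "" in genre_canonical_map else None
--
--     # Split the original string into individual genres, stripping whitespace.
--     individual_genres: List[str] = [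
--         g.strip() for g in original_genre_str.split(";") if g.strip()
--     ]
--
--     if not individual_genres:
--         # If splitting results in no genres (e.g., just whitespace or ";;"), canonicalize to None.
--         return None
--
--     # Map each individual genre to its canonical form
--     canonical_genres_for_entry: List[str] = []
--     for ind_genre in individual_genres:
--         # Look up the canonical form. If not found, map to itself (casefolded).
--         canonical_form = genre_canonical_map.get(
--             ind_genre.casefold(), ind_genre.casefold()
--         )
--         canonical_genres_for_entry.append(canonical_form)
--
--     if not canonical_genres_for_entry:
--         return None
--     elif len(set(canonical_genres_for_entry)) == 1:
--         # If all individual genres canonicalized to the same single genre, choose that one.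
--         return canonical_genres_for_entry[0]
--
--     # Count occurrences of each canonical genre
--     canonical_genre_counts = Counter(canonical_genres_for_entry)
--
--     # Find the maximum count
--     max_count = max(canonical_genre_counts.values())
--
--     # Find all canonical genres that have the maximum count
--     most_frequent_canonical_genres = [
--         g for g, count in canonical_genre_counts.items() if count == max_count
--     ]
--
--     if len(most_frequent_canonical_genres) == 1:
--         # If there's a single most frequent, choose it.
--         return most_frequent_canonical_genres[0]
--
--     # If there's a tie, choose the one that appeared first in the original individual_genres list.
--     chosen_canonical_genre: Optional[str] = None
--     for ind_genre in individual_genres:  # Preserve original order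
--         # Find the canonical form of this individual genre
--         canonical_form = genre_canonical_map.get(
--             ind_genre.casefold(), ind_genre.casefold()
--         )
--         if canonical_form in most_frequent_canonical_genres:
--             chosen_canonical_genre = canonical_form
--             break  # Found the tie-breaker
--     return chosen_canonical_genre  # Returns None if no tie-breaker found (shouldn't happen with valid data)
-- ===== SOURCE B (Python) =====
-- def _select_canonical_genre_for_entry(original_genre_str, genre_canonical_map):
--     if not original_genre_str:
--         return genre_canonical_map.get("", "") if "" in genre_canonical_map else None
--     # One fused pass: split, strip, canonicalize and count into an insertion-ordered
--     # dict; then a single argmax over that dict (max keeps the first-inserted key on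
--     # ties, i.e. the canonical genre that appeared first).
--     counts = {}
--     for part in original_genre_str.split(";"):
--         g = part.strip()
--         if g:
--             c = genre_canonical_map.get(g.casefold(), g.casefold())
--             counts[c] = counts.get(c, 0) + 1
--     if not counts:
--         return None
--     return max(counts, key=counts.get)
-- ===== Notes on version B (the rewrite author's own statement) =====
-- stated objective: simpler
-- what changed: A builds the canonical list, a set-cardinality special case, a Counter, a max over values, a filter for the tied maxima and a separate tie-break rescan of the original list; B fuses split/strip/canonicalize/count into one dict-building pass and replaces all the selection machinery with a single max(counts, key=counts.get) over the insertion-ordered dict, whose first-on-tie rule is exactly A's first-appearance tie-break.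
import Mathlib
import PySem

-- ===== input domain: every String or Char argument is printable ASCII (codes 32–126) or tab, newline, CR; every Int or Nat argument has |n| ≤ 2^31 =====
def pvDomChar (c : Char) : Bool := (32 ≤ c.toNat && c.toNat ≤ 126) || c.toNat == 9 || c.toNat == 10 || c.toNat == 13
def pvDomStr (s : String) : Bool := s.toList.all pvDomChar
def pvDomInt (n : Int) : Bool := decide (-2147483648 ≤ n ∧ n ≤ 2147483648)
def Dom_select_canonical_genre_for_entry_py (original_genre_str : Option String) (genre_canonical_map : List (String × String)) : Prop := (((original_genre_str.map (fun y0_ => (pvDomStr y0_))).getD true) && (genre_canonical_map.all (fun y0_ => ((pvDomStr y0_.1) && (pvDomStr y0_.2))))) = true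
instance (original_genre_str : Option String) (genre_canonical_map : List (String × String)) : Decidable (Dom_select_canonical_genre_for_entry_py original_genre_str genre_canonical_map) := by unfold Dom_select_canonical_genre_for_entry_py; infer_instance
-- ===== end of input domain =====

-- B replaces A's multi-pass selection (canonical list, set check, Counter, max, filter, tie-break
-- rescan) with one fused counting pass and a single first-on-tie argmax over the insertion-ordered
-- dict; objective: simpler, same exact result.



-- ===== PORT A =====
-- Port note: Python str.casefold is PySem.Str.lower here, exact on the ASCII input domain.
-- Shared line of both Pythons: the falsy-input guard and the casefolded map lookup.
def pvFalsyResult (genre_canonical_map : List (String × String)) : Option String :=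
  if (PySem.Dict.mk genre_canonical_map).contains "" then
    some ((PySem.Dict.mk genre_canonical_map).getD "" "")
  else none

def pvCanon (genre_canonical_map : List (String × String)) (g : String) : String :=
  (PySem.Dict.mk genre_canonical_map).getD (PySem.Str.lower g) (PySem.Str.lower g)

-- A's final tie-break loop with break.
def pvTieScan (genre_canonical_map : List (String × String)) (mf : List String) :
    List String → Option String
  | [] => none
  | g :: rest =>
    let c := pvCanon genre_canonical_map g
    if mf.contains c then some c else pvTieScan genre_canonical_map mf rest

def select_canonical_genre_for_entry_py (original_genre_str : Option String)
    (genre_canonical_map : List (String × String)) : Option String :=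
  match original_genre_str with
  | none => pvFalsyResult genre_canonical_map
  | some s =>
    if s = "" then pvFalsyResult genre_canonical_map
    else
      let individual : List String :=
        (((PySem.Str.split? s ";").getD []).filter
          (fun g => decide (PySem.Str.strip g ≠ ""))).map PySem.Str.strip
      if individual = [] then none
      else
        let canonical : List String :=
          individual.foldl (fun acc g => acc ++ [pvCanon genre_canonical_map g]) []
        if canonical = [] then none
        else if PySem.Set.len (PySem.Set.ofList canonical) = 1 then
          PySem.List.pyGet? canonical 0
        else
          let counts := PySem.Dict.counter canonical
          match PySem.List.max? counts.values (fun v => v) with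
          | none => none  -- unreachable: Python's max() over the nonempty values
          | some mx =>
            let mf := (counts.items.filter (fun p => p.2 == mx)).map Prod.fst
            if mf.length = 1 then PySem.List.pyGet? mf 0
            else pvTieScan genre_canonical_map mf individual

-- ===== PORT B =====
def select_canonical_genre_for_entry_py_alt (original_genre_str : Option String)
    (genre_canonical_map : List (String × String)) : Option String :=
  match original_genre_str with
  | none => pvFalsyResult genre_canonical_map
  | some s =>
    if s = "" then pvFalsyResult genre_canonical_map
    else
      let counts : PySem.Dict String Int :=
        ((PySem.Str.split? s ";").getD []).foldl (fun d part =>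
          let g := PySem.Str.strip part
          if g = "" then d
          else
            let c := pvCanon genre_canonical_map g
            d.insert c (d.getD c 0 + 1)) PySem.Dict.empty
      if counts.items = [] then none
      else PySem.List.max? counts.keys (fun k => counts.getD k 0)

-- ===== PRECONDITION & SPEC =====
def Spec_select_canonical_genre_for_entry_py (original_genre_str : Option String) (genre_canonical_map : List (String × String)) (out : Option String) : Prop := out = select_canonical_genre_for_entry_py_alt original_genre_str genre_canonical_map
instance (original_genre_str : Option String) (genre_canonical_map : List (String × String)) (out : Option String) : Decidable (Spec_select_canonical_genre_for_entry_py original_genre_str genre_canonical_map out) := by unfold Spec_select_canonical_genre_for_entry_py; infer_instance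

-- ===== CLAIM (what is proved, stated in full; the proofs are below) =====
def Claim_equal_select_canonical_genre_for_entry_py : Prop := ∀ (original_genre_str : Option String) (genre_canonical_map : List (String × String)), Dom_select_canonical_genre_for_entry_py original_genre_str genre_canonical_map → Spec_select_canonical_genre_for_entry_py original_genre_str genre_canonical_map (select_canonical_genre_for_entry_py original_genre_str genre_canonical_map)

-- ===== LEMMAS AND PROOFS =====


-- ===== LEMMAS AND PROOFS =====

-- The accumulator view of PySem.List.max? (Python's max keeps the FIRST extremal element).
def pvRunMax {α : Type} (key : α → Int) (a : α) (l : List α) : α :=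
  l.foldl (fun m x => if key m < key x then x else m) a

theorem pvRunMax_cons {α : Type} (key : α → Int) (a x : α) (t : List α) :
    pvRunMax key a (x :: t) = pvRunMax key (if key a < key x then x else a) t := rfl

theorem pvFoldl_some {α : Type} (key : α → Int) (l : List α) (a : α) :
    List.foldl (fun acc x => match acc with
      | none => some x
      | some m => if key m < key x then some x else some m) (some a) l
    = some (pvRunMax key a l) := by
  induction l generalizing a with
  | nil => rfl
  | cons x t ih =>
    simp only [List.foldl_cons, pvRunMax]
    by_cases h : key a < key x <;> simp [h, ih, pvRunMax]

theorem pvMax?_cons {α : Type} (key : α → Int) (a : α) (l : List α) :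
    PySem.List.max? (a :: l) key = some (pvRunMax key a l) := by
  simp only [PySem.List.max?, List.foldl_cons]
  exact pvFoldl_some key l a

theorem pvRunMax_find {α : Type} (key : α → Int) (l : List α) (a : α) :
    pvRunMax key a l = a ∨
      (List.find? (fun x => key x == key (pvRunMax key a l)) l = some (pvRunMax key a l) ∧
        key a < key (pvRunMax key a l)) := by
  induction l generalizing a with
  | nil => exact Or.inl rfl
  | cons x t ih =>
    rw [pvRunMax_cons]
    by_cases h : key a < key x
    · rw [if_pos h]
      rcases ih x with heq | ⟨hf, hlt⟩
      · rw [heq]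
        refine Or.inr ⟨?_, h⟩
        rw [List.find?_cons_of_pos (by simp)]
      · refine Or.inr ⟨?_, lt_trans h hlt⟩
        rw [List.find?_cons_of_neg (by simp; exact Int.ne_of_lt hlt)]
        exact hf
    · rw [if_neg h]
      rcases ih a with heq | ⟨hf, hlt⟩
      · exact Or.inl heq
      · refine Or.inr ⟨?_, hlt⟩
        have hxm : key x < key (pvRunMax key a t) := lt_of_le_of_lt (le_of_not_gt h) hlt
        rw [List.find?_cons_of_neg (by simp; exact Int.ne_of_lt hxm)]
        exact hf

-- Python's max over a list returns the FIRST element attaining the maximal key.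
theorem pvMax?_find {α : Type} (key : α → Int) (l : List α) (m : α)
    (h : PySem.List.max? l key = some m) :
    List.find? (fun x => key x == key m) l = some m := by
  cases l with
  | nil => simp [PySem.List.max?] at h
  | cons a t =>
    rw [pvMax?_cons] at h
    have hm : pvRunMax key a t = m := Option.some.inj h
    rcases pvRunMax_find key t a with heq | ⟨hf, hlt⟩
    · rw [heq] at hm
      rw [← hm, List.find?_cons_of_pos (by simp)]
    · rw [hm] at hf hlt
      rw [List.find?_cons_of_neg (by simp; exact Int.ne_of_lt hlt)]
      exact hf

theorem pvRunMax_map {α : Type} (key : α → Int) (l : List α) (a : α) :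
    pvRunMax (fun v => v) (key a) (l.map key) = key (pvRunMax key a l) := by
  induction l generalizing a with
  | nil => rfl
  | cons x t ih =>
    rw [List.map_cons, pvRunMax_cons, pvRunMax_cons]
    by_cases h : key a < key x
    · rw [if_pos h, if_pos h]; exact ih x
    · rw [if_neg h, if_neg h]; exact ih a

-- max over the mapped keys is the key of the argmax.
theorem pvMax?_map {α : Type} (key : α → Int) (l : List α) :
    PySem.List.max? (l.map key) (fun v => v) = (PySem.List.max? l key).map key := by
  cases l with
  | nil => rfl
  | cons a t =>
    rw [List.map_cons, pvMax?_cons, pvMax?_cons, Option.map_some]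
    exact congrArg some (pvRunMax_map key t a)

theorem pvFind?_congr {α : Type} (f g : α → Bool) (l : List α)
    (h : ∀ x ∈ l, f x = g x) : l.find? f = l.find? g := by
  induction l with
  | nil => rfl
  | cons a t ih =>
    have ha := h a (List.mem_cons_self)
    cases hfa : f a with
    | true =>
      rw [List.find?_cons_of_pos hfa, List.find?_cons_of_pos (ha ▸ hfa)]
    | false =>
      rw [List.find?_cons_of_neg (by simp [hfa]), List.find?_cons_of_neg (by simp [← ha, hfa])]
      exact ih (fun x hx => h x (List.mem_cons_of_mem a hx))

theorem pvFind?_filter_ne {α : Type} [BEq α] [LawfulBEq α] (p : α → Bool) (c : α)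
    (hc : p c = false) (l : List α) :
    List.find? p (l.filter (fun y => !(y == c))) = List.find? p l := by
  induction l with
  | nil => rfl
  | cons a t ih =>
    by_cases hac : a = c
    · subst hac
      simp only [List.filter_cons, BEq.rfl, Bool.not_true, Bool.false_eq_true, ite_false]
      rw [ih, List.find?_cons_of_neg (by simp [hc])]
    · rw [List.filter_cons, if_pos (by simp [hac])]
      cases hpa : p a with
      | true =>
        rw [List.find?_cons_of_pos hpa, List.find?_cons_of_pos hpa]
      | false =>
        rw [List.find?_cons_of_neg (by simp [hpa]), List.find?_cons_of_neg (by simp [hpa])]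
        exact ih

-- find? looks through set(xs): the first-occurrence dedup keeps the first match.
theorem pvFind?_ofList (p : String → Bool) (cs : List String) :
    List.find? p (PySem.Set.ofList cs) = List.find? p cs := by
  induction cs with
  | nil => rfl
  | cons c t ih =>
    rw [PySem.Set.ofList_cons]
    cases hpc : p c with
    | true =>
      rw [List.find?_cons_of_pos hpc, List.find?_cons_of_pos hpc]
    | false =>
      rw [List.find?_cons_of_neg (by simp [hpc]), List.find?_cons_of_neg (by simp [hpc])]
      rw [show PySem.Set.discard (PySem.Set.ofList t) c
            = (PySem.Set.ofList t).filter (fun y => !(y == c)) from rfl]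
      rw [pvFind?_filter_ne p c hpc, ih]

-- A's tie-break loop is find? over the canonicalized list.
theorem pvTieScan_eq (gm : List (String × String)) (mf : List String) (l : List String) :
    pvTieScan gm mf l = (l.map (pvCanon gm)).find? (fun c => mf.contains c) := by
  induction l with
  | nil => rfl
  | cons g t ih =>
    simp only [pvTieScan, List.map_cons]
    cases hc : mf.contains (pvCanon gm g) with
    | true => rw [if_pos (by simp), List.find?_cons_of_pos hc]
    | false => rw [if_neg (by simp), List.find?_cons_of_neg (by simp only [hc]; exact Bool.false_ne_true), ih]

-- B's fused counting loop builds Counter of the canonicalized list.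
theorem pvCountsB_eq (gm : List (String × String)) (sp : List String) :
    sp.foldl (fun d part =>
        let g := PySem.Str.strip part
        if g = "" then d
        else
          let c := pvCanon gm g
          d.insert c (d.getD c 0 + 1)) PySem.Dict.empty
      = PySem.Dict.counter
          (((sp.filter (fun g => decide (PySem.Str.strip g ≠ ""))).map PySem.Str.strip).map
            (pvCanon gm)) := by
  rw [List.map_map]
  have hbody : (fun (d : PySem.Dict String Int) part =>
      let g := PySem.Str.strip part
      if g = "" then d
      else
        let c := pvCanon gm g
        d.insert c (d.getD c 0 + 1))
      = fun (d : PySem.Dict String Int) part =>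
        if PySem.Str.strip part ≠ "" then
          d.insert (pvCanon gm (PySem.Str.strip part))
            (d.getD (pvCanon gm (PySem.Str.strip part)) 0 + 1)
        else d := by
    funext d part
    simp only [ite_not]
  rw [hbody, PySem.List.foldl_ite_eq_foldl_filter
    (p := fun part => PySem.Str.strip part ≠ "")
    (f := fun (d : PySem.Dict String Int) part =>
      d.insert (pvCanon gm (PySem.Str.strip part))
        (d.getD (pvCanon gm (PySem.Str.strip part)) 0 + 1))]
  rw [← List.foldl_map (f := fun part => pvCanon gm (PySem.Str.strip part))
    (g := fun (d : PySem.Dict String Int) c => d.insert c (d.getD c 0 + 1))]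
  rw [PySem.Dict.foldl_insert_getD_add_one_eq_counter]
  rfl

-- The heart: A's branchy selection over the nonempty canonical list cs equals
-- "first key of set(cs) with maximal count", which is what B's argmax computes.
theorem pvSelect_eq (cs : List String) (hcs : cs ≠ []) :
    (if PySem.Set.len (PySem.Set.ofList cs) = 1 then PySem.List.pyGet? cs 0
     else
       match PySem.List.max? (PySem.Dict.counter cs).values (fun v => v) with
       | none => none
       | some mx =>
         if (((PySem.Dict.counter cs).items.filter (fun p => p.2 == mx)).map Prod.fst).length
             = 1 then
           PySem.List.pyGet?
             (((PySem.Dict.counter cs).items.filter (fun p => p.2 == mx)).map Prod.fst) 0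
         else
           cs.find? (fun c =>
             (((PySem.Dict.counter cs).items.filter (fun p => p.2 == mx)).map
               Prod.fst).contains c))
    = PySem.List.max? (PySem.Set.ofList cs)
        (fun k => ((List.count k cs : Nat) : Int)) := by
  obtain ⟨c, t, rfl⟩ : ∃ c t, cs = c :: t := by
    cases cs with
    | nil => exact absurd rfl hcs
    | cons c t => exact ⟨c, t, rfl⟩
  set K := PySem.Set.ofList (c :: t) with hKdef
  set key : String → Int := fun k => ((List.count k (c :: t) : Nat) : Int) with hkey
  have hKcons : K = c :: PySem.Set.discard (PySem.Set.ofList t) c := PySem.Set.ofList_cons c t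
  obtain ⟨m, hm⟩ : ∃ m, PySem.List.max? K key = some m := by
    cases h : PySem.List.max? K key with
    | none =>
      rw [PySem.List.max?_eq_none_iff, hKcons] at h
      exact absurd h (List.cons_ne_nil _ _)
    | some m => exact ⟨m, rfl⟩
  have hval : (PySem.Dict.counter (c :: t)).values = K.map key := by
    simp only [PySem.Dict.values, PySem.Dict.items_counter, List.map_map]
    rfl
  rw [hm, hval, pvMax?_map, hm, Option.map_some]
  dsimp only
  have hmf : ((PySem.Dict.counter (c :: t)).items.filter (fun p => p.2 == key m)).map Prod.fst
      = K.filter (fun k => key k == key m) := by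
    rw [PySem.Dict.items_counter, List.filter_map, List.map_map]
    simp only [Function.comp_def]
    exact List.map_id _
  by_cases hlen : PySem.Set.len K = 1
  · rw [if_pos hlen]
    have hdisc : PySem.Set.discard (PySem.Set.ofList t) c = [] := by
      rw [hKcons] at hlen
      simp only [PySem.Set.len, List.length_cons] at hlen
      have hl : ((PySem.Set.ofList t).discard c).length + 1 = 1 := by exact_mod_cast hlen
      exact List.length_eq_zero_iff.mp (by omega)
    have hKc : K = [c] := by rw [hKcons, hdisc]
    have hmc : m = c := by
      rw [hKc, pvMax?_cons] at hm
      exact (Option.some.inj hm).symm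
    rw [hmc, PySem.List.pyGet?_zero_cons]
  · rw [if_neg hlen]
    have hfind : K.find? (fun k => key k == key m) = some m := pvMax?_find key K m hm
    rw [hmf]
    by_cases h1 : (K.filter (fun k => key k == key m)).length = 1
    · rw [if_pos h1]
      obtain ⟨k0, hk0⟩ := List.length_eq_one_iff.mp h1
      have hpm := List.find?_some (p := fun k => key k == key m) hfind
      have hmemK : m ∈ K := List.mem_of_find?_eq_some hfind
      have hmmf : m ∈ K.filter (fun k => key k == key m) := List.mem_filter.mpr ⟨hmemK, hpm⟩
      rw [hk0] at hmmf
      have hmk0 : m = k0 := by simpa using hmmf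
      rw [hk0, PySem.List.pyGet?_zero_cons, hmk0]
    · rw [if_neg h1]
      rw [pvFind?_congr _ (fun k => key k == key m) _ ?memcong]
      · rw [← pvFind?_ofList]
        exact hfind
      case memcong =>
        intro x hx
        have hxK : x ∈ K := by rw [hKdef]; exact (PySem.Set.mem_ofList _ _).mpr hx
        cases hkx : (key x == key m) with
        | true =>
          simp only [hkx]
          have hxf : x ∈ K.filter (fun k => key k == key m) := List.mem_filter.mpr ⟨hxK, hkx⟩
          simpa [List.contains_iff_mem] using hxf
        | false =>
          simp only [hkx]
          have hne : ¬ key x = key m := by simpa using hkx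
          simp [List.mem_filter, hne]

-- ===== VERDICT (by name: the statement is the Claim_ definition above) =====
theorem select_canonical_genre_for_entry_py_spec :
    Claim_equal_select_canonical_genre_for_entry_py := by
  unfold Claim_equal_select_canonical_genre_for_entry_py
    Spec_select_canonical_genre_for_entry_py
  intro o gm _
  cases o with
  | none => rfl
  | some s =>
    by_cases hs : s = ""
    · simp only [select_canonical_genre_for_entry_py, select_canonical_genre_for_entry_py_alt,
        if_pos hs]
    · simp only [select_canonical_genre_for_entry_py, select_canonical_genre_for_entry_py_alt,
        if_neg hs]
      rw [pvCountsB_eq]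
      set sp : List String := (PySem.Str.split? s ";").getD [] with hsp
      set ind : List String :=
        (sp.filter (fun g => decide (PySem.Str.strip g ≠ ""))).map PySem.Str.strip with hind
      by_cases hempty : ind = []
      · rw [if_pos hempty, hempty]
        rfl
      · rw [if_neg hempty, PySem.List.foldl_append_singleton_eq_map, List.nil_append]
        have hcs : ind.map (pvCanon gm) ≠ [] := by
          simpa [List.map_eq_nil_iff] using hempty
        rw [if_neg hcs]
        have hitems : (PySem.Dict.counter (ind.map (pvCanon gm))).items ≠ [] := by
          rw [PySem.Dict.items_counter]
          simp only [ne_eq, List.map_eq_nil_iff]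
          cases h : ind.map (pvCanon gm) with
          | nil => exact absurd h hcs
          | cons c t => rw [PySem.Set.ofList_cons]; exact List.cons_ne_nil _ _
        rw [if_neg hitems, PySem.Dict.keys_counter]
        have hkeyfun : (fun k => (PySem.Dict.counter (ind.map (pvCanon gm))).getD k 0)
            = fun k => ((List.count k (ind.map (pvCanon gm)) : Nat) : Int) :=
          funext (fun k => PySem.Dict.getD_counter _ k)
        rw [hkeyfun]
        simp only [pvTieScan_eq]
        exact pvSelect_eq (ind.map (pvCanon gm)) hcs
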